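-- pv_equiv track=rewrite | github.com/stmarkevich/advent-of-code | 2022/day-9/day-9.py | move_tail
-- ===== SOURCE A (Python) =====
-- def move_tail(head, tail):
--     """If necessary move the tail to the position where the tension is minimal."""
--
--     def force(head, tail):
--         f = head[0] - tail[0], head[1] - tail[1]
--         return f[0] * f[0] + f[1] * f[1]
--
--     f = force(head, tail)
--     if f > 2:
--         min_force = f
--         min_position = tail
--
--         for inc_x in [-1, 0, 1]:
--             for inc_y in [-1, 0, 1]:
--                 if inc_x or inc_y:
--                     new_tail = tail[0] + inc_x, tail[1] + inc_y
--                     new_force = force(head, new_tail)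
--                     if new_force < min_force:
--                         min_position = new_tail
--                         min_force = new_force
--         tail = min_position
--
--     return tail
-- ===== SOURCE B (Python) =====
-- def move_tail(head, tail):
--     """If necessary move the tail to the position where the tension is minimal."""
--     dx = head[0] - tail[0]
--     dy = head[1] - tail[1]
--     if dx * dx + dy * dy > 2:
--         return (tail[0] + ((dx > 0) - (dx < 0)), tail[1] + ((dy > 0) - (dy < 0)))
--     return tail
-- ===== Notes on version B (the rewrite author's own statement) =====
-- stated objective: simpler
-- what changed: Replaced the 3x3 neighbourhood search for the distance-minimizing step with a closed-form per-axis sign step (tail moves by sign(dx), sign(dy) when the squared distance exceeds 2), proved to pick the same unique minimizer.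
import Mathlib
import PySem

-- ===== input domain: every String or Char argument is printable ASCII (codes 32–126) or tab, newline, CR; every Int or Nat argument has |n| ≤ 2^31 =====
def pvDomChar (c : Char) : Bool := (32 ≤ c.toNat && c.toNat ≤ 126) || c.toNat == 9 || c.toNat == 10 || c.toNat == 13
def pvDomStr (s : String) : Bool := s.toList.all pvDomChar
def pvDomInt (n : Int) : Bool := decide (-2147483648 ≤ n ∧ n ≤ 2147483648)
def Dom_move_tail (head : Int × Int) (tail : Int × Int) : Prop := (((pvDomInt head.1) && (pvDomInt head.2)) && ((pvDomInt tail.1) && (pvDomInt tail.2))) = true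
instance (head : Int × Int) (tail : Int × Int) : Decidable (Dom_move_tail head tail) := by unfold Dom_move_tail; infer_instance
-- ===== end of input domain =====

-- B replaces A's 3x3 minimizing neighbour scan by the closed-form per-axis sign step; simpler, same value.

-- ===== PORT A =====
-- Python's inner helper `force`
def pvForce (head : Int × Int) (tail : Int × Int) : Int :=
  let f := (head.1 - tail.1, head.2 - tail.2)
  f.1 * f.1 + f.2 * f.2

-- the body of the inner `for inc_y` loop with its `if inc_x or inc_y` guard, acting on state (min_force, min_position)
def pvStep (head : Int × Int) (tail : Int × Int) (s : Int × (Int × Int)) (inc : Int × Int) :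
    Int × (Int × Int) :=
  if inc.1 ≠ 0 ∨ inc.2 ≠ 0 then
    let new_tail := (tail.1 + inc.1, tail.2 + inc.2)
    let new_force := pvForce head new_tail
    if new_force < s.1 then (new_force, new_tail) else s
  else s

def move_tail (head : Int × Int) (tail : Int × Int) : Int × Int :=
  let f := pvForce head tail
  if f > 2 then
    let r := [(-1 : Int), 0, 1].foldl
      (fun s inc_x => [(-1 : Int), 0, 1].foldl (fun s inc_y => pvStep head tail s (inc_x, inc_y)) s)
      (f, tail)
    r.2
  else tail

-- ===== PORT B =====
-- Python's ((d > 0) - (d < 0))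
def pvSgn (d : Int) : Int := (if d > 0 then 1 else 0) - (if d < 0 then 1 else 0)

def move_tail_alt (head : Int × Int) (tail : Int × Int) : Int × Int :=
  let dx := head.1 - tail.1
  let dy := head.2 - tail.2
  if dx * dx + dy * dy > 2 then (tail.1 + pvSgn dx, tail.2 + pvSgn dy) else tail

-- ===== PRECONDITION & SPEC =====
def Spec_move_tail (head : Int × Int) (tail : Int × Int) (out : Int × Int) : Prop := out = move_tail_alt head tail
instance (head : Int × Int) (tail : Int × Int) (out : Int × Int) : Decidable (Spec_move_tail head tail out) := by unfold Spec_move_tail; infer_instance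

-- ===== CLAIM (what is proved, stated in full; the proofs are below) =====
def Claim_equal_move_tail : Prop := ∀ (head : Int × Int) (tail : Int × Int), Dom_move_tail head tail → Spec_move_tail head tail (move_tail head tail)

-- ===== LEMMAS AND PROOFS =====

-- force of the candidate obtained by moving tail by inc
def pvK (head tail inc : Int × Int) : Int :=
  pvForce head (tail.1 + inc.1, tail.2 + inc.2)

theorem pvStep_eq (head tail : Int × Int) (s : Int × (Int × Int)) (inc : Int × Int) :
    pvStep head tail s inc =
      if inc.1 ≠ 0 ∨ inc.2 ≠ 0 then
        (if pvK head tail inc < s.1 then (pvK head tail inc, (tail.1 + inc.1, tail.2 + inc.2)) else s)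
      else s := rfl

-- if no remaining candidate beats the current min, the fold keeps its state
theorem pv_keep (head tail : Int × Int) :
    ∀ (cs : List (Int × Int)) (s : Int × (Int × Int)),
      (∀ y ∈ cs, s.1 ≤ pvK head tail y) →
      cs.foldl (pvStep head tail) s = s := by
  intro cs
  induction cs with
  | nil => intro s _; rfl
  | cons c cs ih =>
    intro s h
    have hc : s.1 ≤ pvK head tail c := h c (by simp)
    have hstep : pvStep head tail s c = s := by
      rw [pvStep_eq]
      split_ifs with h1 h2
      · omega
      · rfl
      · rfl
    rw [List.foldl_cons, hstep]
    exact ih s (fun y hy => h y (by simp [hy]))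

-- the strict unique minimizer wins the fold
theorem pv_main (head tail : Int × Int) (x : Int × Int) (hx0 : x ≠ (0, 0)) :
    ∀ (cs : List (Int × Int)) (s : Int × (Int × Int)),
      cs.Nodup → x ∈ cs → pvK head tail x < s.1 →
      (∀ y ∈ cs, y ≠ x → pvK head tail x < pvK head tail y) →
      (cs.foldl (pvStep head tail) s).2 = (tail.1 + x.1, tail.2 + x.2) := by
  intro cs
  induction cs with
  | nil => intro s _ hmem; simp at hmem
  | cons c cs ih =>
    intro s hnd hmem hlt hall
    rw [List.foldl_cons]
    rcases List.mem_cons.mp hmem with hcx | hxs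
    · subst hcx
      have hguard : x.1 ≠ 0 ∨ x.2 ≠ 0 := by
        by_contra hc
        push_neg at hc
        exact hx0 (Prod.ext hc.1 hc.2)
      have hstep : pvStep head tail s x = (pvK head tail x, (tail.1 + x.1, tail.2 + x.2)) := by
        rw [pvStep_eq, if_pos hguard, if_pos hlt]
      rw [hstep, pv_keep head tail cs _ ?_]
      intro y hy
      have hyne : y ≠ x := fun h => (List.nodup_cons.mp hnd).1 (h ▸ hy)
      exact le_of_lt (hall y (by simp [hy]) hyne)
    · have hcx : c ≠ x := fun h => (List.nodup_cons.mp hnd).1 (h ▸ hxs)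
      refine ih _ (List.nodup_cons.mp hnd).2 hxs ?_ (fun y hy hyx => hall y (by simp [hy]) hyx)
      rw [pvStep_eq]
      split_ifs with h1 h2
      · exact hall c (by simp) hcx
      · exact hlt
      · exact hlt

-- pvSgn d is the unique closest element of {-1,0,1} to d, per axis
theorem pv_axis_le (d a : Int) (ha : a = -1 ∨ a = 0 ∨ a = 1) :
    (d - pvSgn d) * (d - pvSgn d) ≤ (d - a) * (d - a) := by
  unfold pvSgn
  rcases ha with h | h | h <;> subst h <;> split_ifs <;> nlinarith

theorem pv_axis_lt (d a : Int) (ha : a = -1 ∨ a = 0 ∨ a = 1) (hne : a ≠ pvSgn d) :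
    (d - pvSgn d) * (d - pvSgn d) < (d - a) * (d - a) := by
  unfold pvSgn at *
  rcases ha with h | h | h <;> subst h <;> split_ifs at * <;> first | omega | nlinarith

theorem pv_combine (head tail : Int × Int) (a b : Int)
    (ha : a = -1 ∨ a = 0 ∨ a = 1) (hb : b = -1 ∨ b = 0 ∨ b = 1)
    (hne : (a, b) ≠ (pvSgn (head.1 - tail.1), pvSgn (head.2 - tail.2))) :
    pvK head tail (pvSgn (head.1 - tail.1), pvSgn (head.2 - tail.2)) < pvK head tail (a, b) := by
  have hne' : a ≠ pvSgn (head.1 - tail.1) ∨ b ≠ pvSgn (head.2 - tail.2) := by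
    by_contra hc
    push_neg at hc
    exact hne (by simp [hc.1, hc.2])
  simp only [pvK, pvForce]
  have e1 : head.1 - (tail.1 + pvSgn (head.1 - tail.1)) = (head.1 - tail.1) - pvSgn (head.1 - tail.1) := by ring
  have e2 : head.2 - (tail.2 + pvSgn (head.2 - tail.2)) = (head.2 - tail.2) - pvSgn (head.2 - tail.2) := by ring
  have e3 : head.1 - (tail.1 + a) = (head.1 - tail.1) - a := by ring
  have e4 : head.2 - (tail.2 + b) = (head.2 - tail.2) - b := by ring
  rcases hne' with h | h
  · have h1 := pv_axis_lt (head.1 - tail.1) a ha h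
    have h2 := pv_axis_le (head.2 - tail.2) b hb
    simp only [e1, e2, e3, e4]
    omega
  · have h1 := pv_axis_le (head.1 - tail.1) a ha
    have h2 := pv_axis_lt (head.2 - tail.2) b hb h
    simp only [e1, e2, e3, e4]
    omega

theorem pvSgn_mem (d : Int) : pvSgn d = -1 ∨ pvSgn d = 0 ∨ pvSgn d = 1 := by
  unfold pvSgn; split_ifs <;> omega

-- the nested Python loop is a fold over the 9 concrete increments in order
theorem pv_unnest (head tail : Int × Int) (s : Int × (Int × Int)) :
    [(-1 : Int), 0, 1].foldl
      (fun s inc_x => [(-1 : Int), 0, 1].foldl (fun s inc_y => pvStep head tail s (inc_x, inc_y)) s) s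
    = [((-1 : Int), (-1 : Int)), (-1, 0), (-1, 1), (0, -1), (0, 0), (0, 1),
        (1, -1), (1, 0), (1, 1)].foldl (pvStep head tail) s := by
  simp only [List.foldl_cons, List.foldl_nil]

set_option maxHeartbeats 1000000 in
theorem move_tail_eq_alt (head tail : Int × Int) : move_tail head tail = move_tail_alt head tail := by
  obtain ⟨hx, hy⟩ := head
  obtain ⟨tx, ty⟩ := tail
  simp only [move_tail, move_tail_alt, pvForce]
  by_cases hf : (hx - tx) * (hx - tx) + (hy - ty) * (hy - ty) > 2
  · rw [if_pos hf, if_pos hf, pv_unnest]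
    set sx := pvSgn (hx - tx) with hsx
    set sy := pvSgn (hy - ty) with hsy
    have hsxm := pvSgn_mem (hx - tx)
    have hsym := pvSgn_mem (hy - ty)
    rw [← hsx] at hsxm; rw [← hsy] at hsym
    have hx0 : (sx, sy) ≠ ((0 : Int), (0 : Int)) := by
      intro hc
      have h1 : sx = 0 := congrArg Prod.fst hc
      have h2 : sy = 0 := congrArg Prod.snd hc
      rw [hsx] at h1; rw [hsy] at h2
      unfold pvSgn at h1 h2
      split_ifs at h1 h2 <;> nlinarith
    have hcomb : ∀ a b : Int, (a = -1 ∨ a = 0 ∨ a = 1) → (b = -1 ∨ b = 0 ∨ b = 1) →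
        (a, b) ≠ (sx, sy) → pvK (hx, hy) (tx, ty) (sx, sy) < pvK (hx, hy) (tx, ty) (a, b) := by
      intro a b ha hb hne
      exact pv_combine (hx, hy) (tx, ty) a b ha hb hne
    have hK00 : pvK (hx, hy) (tx, ty) ((0 : Int), (0 : Int))
        = (hx - tx) * (hx - tx) + (hy - ty) * (hy - ty) := by
      simp [pvK, pvForce]
    have hlt : pvK (hx, hy) (tx, ty) (sx, sy) < (hx - tx) * (hx - tx) + (hy - ty) * (hy - ty) := by
      rw [← hK00]
      exact hcomb 0 0 (by omega) (by omega) (Ne.symm hx0)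
    have := pv_main (hx, hy) (tx, ty) (sx, sy) hx0
      [((-1 : Int), (-1 : Int)), (-1, 0), (-1, 1), (0, -1), (0, 0), (0, 1), (1, -1), (1, 0), (1, 1)]
      ((hx - tx) * (hx - tx) + (hy - ty) * (hy - ty), (tx, ty))
      (by decide)
      (by rcases hsxm with h | h | h <;> rcases hsym with h' | h' | h' <;> simp [h, h'])
      hlt
      (by
        intro y hy' hyne
        fin_cases hy' <;>
          exact hcomb _ _ (by omega) (by omega) hyne)
    exact this
  · rw [if_neg hf, if_neg hf]

-- ===== VERDICT (by name: the statement is the Claim_ definition above) =====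
theorem move_tail_spec : Claim_equal_move_tail := by
  intro head tail _
  unfold Spec_move_tail
  exact move_tail_eq_alt head tail
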